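-- pv_equiv track=rewrite | github.com/cjlee112/reusabletext | graphviz.py | replace_newlines
-- ===== SOURCE A (Python) =====
-- def replace_newlines(s):
--     s = s.strip()
--     l = s.split('\n') # replace newlines with space and <BR>
--     result = []
--     empty = False
--     for s in l:
--         if s == '':
--             empty = True
--         else:
--             if empty: # paragraph separator
--                 result.append('<BR><BR>')
--                 empty = False
--             result.append(s)
--     return ' '.join(result)
-- ===== SOURCE B (Python) =====
-- def replace_newlines(s):
--     paragraphs = []
--     cur = []
--     for line in s.strip().split('\n'):
--         if line:
--             cur.append(line)
--         elif cur:
--             paragraphs.append(' '.join(cur))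
--             cur = []
--     if cur:
--         paragraphs.append(' '.join(cur))
--     return ' <BR><BR> '.join(paragraphs)
-- ===== Notes on version B (the rewrite author's own statement) =====
-- stated objective: idiomatic
-- what changed: Replaces the flat token list with a pending-empty boolean flag by a two-level decomposition: group consecutive non-blank lines into paragraphs, join each paragraph with single spaces, then join the paragraphs with the space-padded BR-BR separator.
import Mathlib
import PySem

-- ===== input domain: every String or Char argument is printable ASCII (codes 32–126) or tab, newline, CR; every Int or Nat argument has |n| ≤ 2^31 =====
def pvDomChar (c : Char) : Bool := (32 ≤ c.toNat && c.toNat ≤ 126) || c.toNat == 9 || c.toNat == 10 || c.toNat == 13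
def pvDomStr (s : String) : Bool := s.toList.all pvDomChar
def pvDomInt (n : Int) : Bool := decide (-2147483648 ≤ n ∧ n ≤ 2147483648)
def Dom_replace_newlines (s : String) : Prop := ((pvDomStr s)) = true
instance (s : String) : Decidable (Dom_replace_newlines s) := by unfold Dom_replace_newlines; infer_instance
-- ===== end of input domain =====

-- B re-decomposes A's single flag-driven token loop into: group lines into paragraphs,
-- space-join each paragraph, ' <BR><BR> '-join the paragraphs (idiomatic; same cost).

-- ===== PORT A =====
-- the loop body: result/empty state, lines appended flat, '<BR><BR>' token on a paragraph break
def stepA (st : List (List Char) × Bool) (line : List Char) : List (List Char) × Bool :=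
  if line = [] then (st.1, true)
  else ((if st.2 then st.1 ++ ["<BR><BR>".toList] else st.1) ++ [line], false)

def replace_newlines (s : String) : String :=
  String.ofList (PySem.Chars.join [' ']
    ((PySem.Chars.splitOn (PySem.Chars.strip s.toList) ['\n']).foldl stepA ([], false)).1)

-- ===== PORT B =====
-- the loop body: accumulate the current paragraph's lines; on a blank line flush it (space-joined)
def stepB (st : List (List Char) × List (List Char)) (line : List Char) :
    List (List Char) × List (List Char) :=
  if line ≠ [] then (st.1, st.2 ++ [line])
  else if st.2 ≠ [] then (st.1 ++ [PySem.Chars.join [' '] st.2], [])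
  else st

-- final flush of the trailing paragraph + join with ' <BR><BR> '
def outB (st : List (List Char) × List (List Char)) : String :=
  String.ofList (PySem.Chars.join " <BR><BR> ".toList
    (if st.2 ≠ [] then st.1 ++ [PySem.Chars.join [' '] st.2] else st.1))

def replace_newlines_alt (s : String) : String :=
  outB ((PySem.Chars.splitOn (PySem.Chars.strip s.toList) ['\n']).foldl stepB ([], []))

-- ===== PRECONDITION & SPEC =====
def Spec_replace_newlines (s : String) (out : String) : Prop := out = replace_newlines_alt s
instance (s : String) (out : String) : Decidable (Spec_replace_newlines s out) := by unfold Spec_replace_newlines; infer_instance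

-- ===== CLAIM (what is proved, stated in full; the proofs are below) =====
def Claim_equal_replace_newlines : Prop := ∀ (s : String), Dom_replace_newlines s → Spec_replace_newlines s (replace_newlines s)

-- ===== LEMMAS AND PROOFS =====

-- A's flat token list, reconstructed from B-style state: paragraphs ps plus the open paragraph cur
def flatP (ps : List (List (List Char))) (cur : List (List Char)) : List (List Char) :=
  List.intercalate ["<BR><BR>".toList] (ps ++ if cur = [] then [] else [cur])

theorem intercalate_cons_ne {α : Type} (s x : List α) (b : List (List α)) (hb : b ≠ []) :
    List.intercalate s (x :: b) = x ++ s ++ List.intercalate s b := by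
  cases b with
  | nil => simp at hb
  | cons y t => simp [List.intercalate, List.append_assoc]

theorem intercalate_ne_nil_head {α : Type} (s : List α) (q : List α) (rest : List (List α))
    (hq : q ≠ []) : List.intercalate s (q :: rest) ≠ [] := by
  cases rest with
  | nil => simpa [List.intercalate] using hq
  | cons y t => rw [intercalate_cons_ne s q (y :: t) (by simp)]; simp [hq]

theorem intercalate_append_ne_nil {α : Type} (s : List α) (a b : List (List α))
    (ha : a ≠ []) (hb : b ≠ []) :
    List.intercalate s (a ++ b) = List.intercalate s a ++ s ++ List.intercalate s b := by
  induction a with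
  | nil => simp at ha
  | cons x a ih =>
    cases a with
    | nil => simpa [List.intercalate, List.append_assoc] using intercalate_cons_ne s x b hb
    | cons y t =>
      rw [List.cons_append, intercalate_cons_ne s x ((y :: t) ++ b) (by simp),
        intercalate_cons_ne s x (y :: t) (by simp), ih (by simp)]
      simp [List.append_assoc]

-- space-joining A's flat token list = <BR><BR>-joining the space-joined paragraphs
theorem joinFlat (ps : List (List (List Char))) (hps : ∀ p ∈ ps, p ≠ []) :
    PySem.Chars.join [' '] (List.intercalate ["<BR><BR>".toList] ps)
      = PySem.Chars.join " <BR><BR> ".toList (ps.map (PySem.Chars.join [' '])) := by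
  induction ps with
  | nil => rfl
  | cons p ps ih =>
    have hp : p ≠ [] := hps p (by simp)
    cases ps with
    | nil => simp [PySem.Chars.join, List.intercalate]
    | cons q rest =>
      have hq : q ≠ [] := hps q (by simp)
      have hI : List.intercalate ["<BR><BR>".toList] (q :: rest) ≠ [] :=
        intercalate_ne_nil_head _ q rest hq
      simp only [PySem.Chars.join] at *
      rw [intercalate_cons_ne _ p (q :: rest) (by simp), List.append_assoc p,
        intercalate_append_ne_nil [' '] p (["<BR><BR>".toList] ++ List.intercalate ["<BR><BR>".toList] (q :: rest)) hp (by simp),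
        intercalate_append_ne_nil [' '] ["<BR><BR>".toList] (List.intercalate ["<BR><BR>".toList] (q :: rest)) (by simp) hI,
        List.map_cons, intercalate_cons_ne _ _ ((q :: rest).map (PySem.Chars.join [' '])) (by simp),
        ih (fun p hp => hps p (by simp [hp]))]
      have hsep : " <BR><BR> ".toList = [' '] ++ "<BR><BR>".toList ++ [' '] := by decide
      simp [hsep, PySem.Chars.join, List.intercalate, List.append_assoc]

-- appending a line to the open paragraph appends a token to the flat list
theorem flatP_snoc (ps : List (List (List Char))) (c : List (List Char)) (x : List Char) :
    List.intercalate ["<BR><BR>".toList] (ps ++ [c ++ [x]])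
      = List.intercalate ["<BR><BR>".toList] (ps ++ [c]) ++ [x] := by
  cases ps with
  | nil => simp [List.intercalate]
  | cons p t =>
    rw [intercalate_append_ne_nil _ (p :: t) [c ++ [x]] (by simp) (by simp),
      intercalate_append_ne_nil _ (p :: t) [c] (by simp) (by simp)]
    simp [List.intercalate, List.append_assoc]

-- the loop invariant: A's state is (flatP ps cur, empty), B's is (ps.map join, cur)
theorem loopEq (l : List (List Char)) :
    ∀ (ps : List (List (List Char))) (cur : List (List Char)) (empty : Bool),
    (∀ p ∈ ps, p ≠ []) →
    (empty = true → cur = [] ∧ ps ≠ []) →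
    (empty = false → cur ≠ []) →
    PySem.Chars.join [' '] (l.foldl stepA (flatP ps cur, empty)).1
      = (PySem.Chars.join " <BR><BR> ".toList
          (if (l.foldl stepB (ps.map (PySem.Chars.join [' ']), cur)).2 ≠ [] then
            (l.foldl stepB (ps.map (PySem.Chars.join [' ']), cur)).1
              ++ [PySem.Chars.join [' '] (l.foldl stepB (ps.map (PySem.Chars.join [' ']), cur)).2]
          else (l.foldl stepB (ps.map (PySem.Chars.join [' ']), cur)).1)) := by
  induction l with
  | nil =>
    intro ps cur empty hps _ _
    by_cases hc : cur = []
    · subst hc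
      simpa [flatP] using joinFlat ps hps
    · have hmap : (ps.map (PySem.Chars.join [' '])) ++ [PySem.Chars.join [' '] cur]
          = ((ps ++ [cur]).map (PySem.Chars.join [' '])) := by simp
      simp only [List.foldl_nil, if_pos (by simpa using hc), hmap]
      simpa [flatP, hc] using joinFlat (ps ++ [cur]) (by
        intro p hp
        rcases List.mem_append.mp hp with h | h
        · exact hps p h
        · simp at h; simpa [h] using hc)
  | cons line l ih =>
    intro ps cur empty hps h1 h2
    by_cases hline : line = []
    · subst hline
      have hA : stepA (flatP ps cur, empty) [] = (flatP ps cur, true) := by simp [stepA]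
      by_cases hc : cur = []
      · have hemp : empty = true := by
          cases empty
          · exact absurd (h2 rfl) (by simpa using hc)
          · rfl
        subst hemp
        have hB : stepB (ps.map (PySem.Chars.join [' ']), cur) []
            = (ps.map (PySem.Chars.join [' ']), cur) := by simp [stepB, hc]
        rw [List.foldl_cons, List.foldl_cons, hA, hB]
        exact ih ps cur true hps h1 h2
      · have hB : stepB (ps.map (PySem.Chars.join [' ']), cur) []
            = ((ps ++ [cur]).map (PySem.Chars.join [' ']), []) := by simp [stepB, hc]
        have hflat : flatP ps cur = flatP (ps ++ [cur]) [] := by simp [flatP, hc]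
        rw [List.foldl_cons, List.foldl_cons, hA, hB, hflat]
        exact ih (ps ++ [cur]) [] true
          (by
            intro p hp
            rcases List.mem_append.mp hp with h | h
            · exact hps p h
            · simp at h; simpa [h] using hc)
          (by intro _; exact ⟨rfl, by simp⟩) (by simp)
    · cases empty
      · have hc : cur ≠ [] := h2 rfl
        have hA : stepA (flatP ps cur, false) line = (flatP ps cur ++ [line], false) := by
          simp [stepA, hline]
        have hB : stepB (ps.map (PySem.Chars.join [' ']), cur) line
            = (ps.map (PySem.Chars.join [' ']), cur ++ [line]) := by simp [stepB, hline]
        have hflat : flatP ps cur ++ [line] = flatP ps (cur ++ [line]) := by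
          simp only [flatP, if_neg hc, if_neg (show ¬(cur ++ [line] = []) by simp)]
          exact (flatP_snoc ps cur line).symm
        rw [List.foldl_cons, List.foldl_cons, hA, hB, hflat]
        exact ih ps (cur ++ [line]) false hps (by simp) (by intro _; simp)
      · obtain ⟨hc, hpsne⟩ := h1 rfl
        subst hc
        have hA : stepA (flatP ps [], true) line
            = ((flatP ps [] ++ ["<BR><BR>".toList]) ++ [line], false) := by
          simp [stepA, hline]
        have hB : stepB (ps.map (PySem.Chars.join [' ']), []) line
            = (ps.map (PySem.Chars.join [' ']), [] ++ [line]) := by simp [stepB, hline]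
        have hflat : (flatP ps [] ++ ["<BR><BR>".toList]) ++ [line] = flatP ps ([] ++ [line]) := by
          simp only [flatP, List.nil_append,
            if_neg (show ¬([line] = ([] : List (List Char))) by simp)]
          rw [intercalate_append_ne_nil _ ps [[line]] hpsne (by simp)]
          simp [List.intercalate]
        rw [List.foldl_cons, List.foldl_cons, hA, hB, hflat]
        exact ih ps ([] ++ [line]) false hps (by simp) (by intro _; simp)

-- the shape of splitOn.go's result: previous chunks, then the open chunk extended, then more
theorem go_shape (sep : List Char) (fuel : Nat) :
    ∀ (l cur : List Char) (acc : List (List Char)),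
    ∃ c rest, PySem.Chars.splitOn.go sep fuel l cur acc
      = acc.reverse ++ (cur.reverse ++ c) :: rest := by
  induction fuel with
  | zero =>
    intro l cur acc
    refine ⟨l, [], ?_⟩
    rw [PySem.Chars.splitOn.go]; simp
  | succ n ih =>
    intro l cur acc
    cases l with
    | nil =>
      refine ⟨[], [], ?_⟩
      rw [PySem.Chars.splitOn.go]
      all_goals simp
    | cons ch rest =>
      by_cases hpre : sep.isPrefixOf (ch :: rest) = true
      · obtain ⟨c, r, hc⟩ := ih (List.drop sep.length (ch :: rest)) [] (cur.reverse :: acc)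
        refine ⟨[], c :: r, ?_⟩
        rw [PySem.Chars.splitOn.go]
        simp only [hpre, if_true, hc]
        simp
      · obtain ⟨c, r, hc⟩ := ih rest (ch :: cur) acc
        refine ⟨ch :: c, r, ?_⟩
        rw [PySem.Chars.splitOn.go]
        simp only [hpre, hc]
        simp [List.append_assoc]

-- the first line of splitOn t '\n' starts with t's first char when that char is not '\n'
theorem splitOn_head_shape (ch : Char) (t2 : List Char) (hch : ch ≠ '\n') :
    ∃ c rest, PySem.Chars.splitOn (ch :: t2) ['\n'] = (ch :: c) :: rest := by
  show ∃ c rest, PySem.Chars.splitOn.go ['\n'] ((ch :: t2).length + 1) (ch :: t2) [] [] = _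
  have hlen : (ch :: t2).length + 1 = t2.length + 1 + 1 := by simp
  rw [hlen, PySem.Chars.splitOn.go]
  have hpre : List.isPrefixOf ['\n'] (ch :: t2) = false := by
    simp [List.isPrefixOf, Ne.symm hch]
  simp only [hpre, Bool.false_eq_true, if_false]
  obtain ⟨c, r, hc⟩ := go_shape ['\n'] (t2.length + 1) t2 [ch] []
  exact ⟨c, r, by simp [hc]⟩

-- the head of a dropWhile result fails the predicate
theorem dropWhile_head_false (p : Char → Bool) (cs : List Char) (c0 : Char) (d : List Char)
    (hd : List.dropWhile p cs = c0 :: d) : p c0 = false := by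
  induction cs with
  | nil => simp at hd
  | cons a t ih =>
    rw [List.dropWhile_cons] at hd
    by_cases hp : p a
    · exact ih (by simpa [hp] using hd)
    · simp [hp] at hd
      simpa [← hd.1] using hp

-- strip never leaves a leading whitespace char, in particular not '\n'
theorem strip_head (cs : List Char) :
    PySem.Chars.strip cs = [] ∨ ∃ ch t, PySem.Chars.strip cs = ch :: t ∧ ch ≠ '\n' := by
  cases h : PySem.Chars.strip cs with
  | nil => exact Or.inl rfl
  | cons ch t =>
    refine Or.inr ⟨ch, t, rfl, ?_⟩
    have hpref : PySem.Chars.strip cs <+: List.dropWhile PySem.Chars.isspace cs := by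
      have hs : (PySem.Chars.strip cs).reverse <:+ (List.dropWhile PySem.Chars.isspace cs).reverse := by
        simpa [PySem.Chars.strip, PySem.Chars.lstrip, PySem.Chars.rstrip]
          using List.dropWhile_suffix (l := (List.dropWhile PySem.Chars.isspace cs).reverse)
            (p := PySem.Chars.isspace)
      exact List.reverse_suffix.mp hs
    rw [h] at hpref
    cases hd : List.dropWhile PySem.Chars.isspace cs with
    | nil => rw [hd] at hpref; simp at hpref
    | cons c0 d =>
      have hc0 : PySem.Chars.isspace c0 = false := dropWhile_head_false _ cs c0 d hd
      have hche : ch = c0 := by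
        rw [hd] at hpref
        obtain ⟨r, hr⟩ := hpref
        simpa using (congrArg (List.head? ·) hr)
      subst hche
      intro heq
      subst heq
      simp [PySem.Chars.isspace] at hc0

-- ===== VERDICT (by name: the statement is the Claim_ definition above) =====
theorem replace_newlines_spec : Claim_equal_replace_newlines := by
  intro s _
  unfold Spec_replace_newlines replace_newlines replace_newlines_alt outB
  rcases strip_head s.toList with h | ⟨ch, t2, h, hch⟩
  · rw [h]
    rfl
  · rw [h]
    obtain ⟨c, rest, hsplit⟩ := splitOn_head_shape ch t2 hch
    rw [hsplit]
    have hA : stepA ([], false) (ch :: c) = (flatP [] [ch :: c], false) := by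
      simp [stepA, flatP, List.intercalate]
    have hB : stepB ([], []) (ch :: c)
        = (([] : List (List (List Char))).map (PySem.Chars.join [' ']), [ch :: c]) := by
      simp [stepB]
    rw [List.foldl_cons, List.foldl_cons, hA, hB]
    exact congrArg String.ofList
      (loopEq rest [] [ch :: c] false (by simp) (by simp) (by intro _; simp))
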